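-- pv_equiv track=rewrite | github.com/banks1923/Email-Sync-Clean | infrastructure/mcp_servers/legal_intelligence_mcp.py | _determine_case_type
-- ===== SOURCE A (Python) =====
-- LEGAL_DOC_PATTERNS = {
--     "complaint": ["complaint", "petition", "initial filing"],
--     "answer": ["answer", "response", "reply"],
--     "motion": ["motion", "request", "application"],
--     "order": ["order", "ruling", "judgment", "decree"],
--     "discovery": ["interrogatories", "deposition", "request for production"],
--     "notice": ["notice", "summons", "subpoena"],
--     "brief": ["brief", "memorandum", "argument"],
--     "settlement": ["settlement", "agreement", "stipulation"],
--     "transcript": ["transcript", "hearing", "proceedings"],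
-- }
--
-- def _identify_document_types(documents: list[dict]) -> set[str]:
--     """
--     Identify types of legal documents present.
--     """
--     identified_types = set()
--
--     for doc in documents:
--         title = doc.get("title", "").lower()
--         content_preview = doc.get("body", "")[:500].lower()
--
--         for doc_type, patterns in LEGAL_DOC_PATTERNS.items():
--             for pattern in patterns:
--                 if pattern in title or pattern in content_preview:
--                     identified_types.add(doc_type)
--                     break
--
--     return identified_types
--
-- def _determine_case_type(documents: list[dict]) -> str:
--     """
--     Determine the type of legal case from documents.
--     """
--     doc_types = _identify_document_types(documents)
--
--     if "complaint" in doc_types: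
--         # Check for specific case type indicators
--         for doc in documents:
--             content = doc.get("body", "").lower()
--             if "unlawful detainer" in content:
--                 return "unlawful_detainer"
--             elif "personal injury" in content:
--                 return "personal_injury"
--             elif "breach of contract" in content:
--                 return "contract"
--             elif "divorce" in content or "dissolution" in content:
--                 return "family_law"
--
--     return "civil_litigation"  # Default
-- ===== SOURCE B (Python) =====
-- COMPLAINT_PATTERNS = ["complaint", "petition", "initial filing"]
--
-- CASE_INDICATORS = [
--     (["unlawful detainer"], "unlawful_detainer"),
--     (["personal injury"], "personal_injury"),
--     (["breach of contract"], "contract"),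
--     (["divorce", "dissolution"], "family_law"),
-- ]
--
-- def _matches_complaint(doc):
--     title = doc.get("title", "").lower()
--     preview = doc.get("body", "")[:500].lower()
--     return any(p in title or p in preview for p in COMPLAINT_PATTERNS)
--
-- def _determine_case_type(documents):
--     if any(_matches_complaint(doc) for doc in documents):
--         for doc in documents:
--             content = doc.get("body", "").lower()
--             for patterns, label in CASE_INDICATORS:
--                 if any(p in content for p in patterns):
--                     return label
--     return "civil_litigation"
-- ===== Notes on version B (the rewrite author's own statement) =====
-- stated objective: simpler
-- what changed: B drops the full nine-category _identify_document_types set construction and keeps only a has-complaint boolean (any over the three complaint patterns), and replaces the if/elif indicator chain by a data-driven first-match scan over a (patterns, label) table.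
import Mathlib
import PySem

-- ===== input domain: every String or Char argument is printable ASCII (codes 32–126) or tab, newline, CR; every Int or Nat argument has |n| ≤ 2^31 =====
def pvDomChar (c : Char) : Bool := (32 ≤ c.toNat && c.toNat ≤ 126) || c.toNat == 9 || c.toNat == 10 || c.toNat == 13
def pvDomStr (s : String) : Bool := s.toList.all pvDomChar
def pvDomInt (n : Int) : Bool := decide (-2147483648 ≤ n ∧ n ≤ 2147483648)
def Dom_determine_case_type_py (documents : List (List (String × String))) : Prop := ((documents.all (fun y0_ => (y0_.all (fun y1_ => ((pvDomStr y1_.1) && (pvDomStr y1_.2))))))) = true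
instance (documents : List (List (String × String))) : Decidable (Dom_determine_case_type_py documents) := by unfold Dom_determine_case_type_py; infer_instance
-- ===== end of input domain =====

-- B keeps only a has-complaint boolean instead of A's full nine-category document-type set,
-- and scans a (patterns, label) indicator table instead of A's if/elif chain: simpler.

-- shared primitive: Python dict.get(k, dflt) on an association list (first match)
def pvGet (d : List (String × String)) (k dflt : String) : String :=
  match d with
  | [] => dflt
  | (k', v) :: rest => if k' == k then v else pvGet rest k dflt

-- ===== PORT A =====
def legalDocPatterns : List (String × List String) :=
  [("complaint", ["complaint", "petition", "initial filing"]),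
   ("answer", ["answer", "response", "reply"]),
   ("motion", ["motion", "request", "application"]),
   ("order", ["order", "ruling", "judgment", "decree"]),
   ("discovery", ["interrogatories", "deposition", "request for production"]),
   ("notice", ["notice", "summons", "subpoena"]),
   ("brief", ["brief", "memorandum", "argument"]),
   ("settlement", ["settlement", "agreement", "stipulation"]),
   ("transcript", ["transcript", "hearing", "proceedings"])]

-- inner 'for pattern in patterns: if …: add; break'
def addIfMatch (title preview : String) (s : PySem.Set String) (docType : String) : List String → PySem.Set String
  | [] => s
  | p :: rest =>
    if PySem.Str.isIn p title || PySem.Str.isIn p preview then PySem.Set.add s docType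
    else addIfMatch title preview s docType rest

def identifyDocumentTypes (documents : List (List (String × String))) : PySem.Set String :=
  documents.foldl (fun s doc =>
    let title := PySem.Str.lower (pvGet doc "title" "")
    let preview := PySem.Str.lower (PySem.Str.slice (pvGet doc "body" "") none (some 500))
    legalDocPatterns.foldl (fun s' dp => addIfMatch title preview s' dp.1 dp.2) s) PySem.Set.empty

-- the 'for doc in documents: … return …' scan (none = loop fell through)
def scanCaseType : List (List (String × String)) → Option String
  | [] => none
  | doc :: rest =>
    let content := PySem.Str.lower (pvGet doc "body" "")
    if PySem.Str.isIn "unlawful detainer" content then some "unlawful_detainer"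
    else if PySem.Str.isIn "personal injury" content then some "personal_injury"
    else if PySem.Str.isIn "breach of contract" content then some "contract"
    else if PySem.Str.isIn "divorce" content || PySem.Str.isIn "dissolution" content then some "family_law"
    else scanCaseType rest

def determine_case_type_py (documents : List (List (String × String))) : String :=
  let docTypes := identifyDocumentTypes documents
  if PySem.Set.contains docTypes "complaint" then
    (scanCaseType documents).getD "civil_litigation"
  else "civil_litigation"

-- ===== PORT B =====
def complaintPatterns : List String := ["complaint", "petition", "initial filing"]

def caseIndicators : List (List String × String) :=
  [(["unlawful detainer"], "unlawful_detainer"),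
   (["personal injury"], "personal_injury"),
   (["breach of contract"], "contract"),
   (["divorce", "dissolution"], "family_law")]

def matchesComplaint (doc : List (String × String)) : Bool :=
  let title := PySem.Str.lower (pvGet doc "title" "")
  let preview := PySem.Str.lower (PySem.Str.slice (pvGet doc "body" "") none (some 500))
  complaintPatterns.any (fun p => PySem.Str.isIn p title || PySem.Str.isIn p preview)

def classifyDoc (doc : List (String × String)) : Option String :=
  let content := PySem.Str.lower (pvGet doc "body" "")
  caseIndicators.findSome? (fun pl => if pl.1.any (fun p => PySem.Str.isIn p content) then some pl.2 else none)

def determine_case_type_py_alt (documents : List (List (String × String))) : String :=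
  if documents.any matchesComplaint then
    (documents.findSome? classifyDoc).getD "civil_litigation"
  else "civil_litigation"

-- ===== PRECONDITION & SPEC =====
def Spec_determine_case_type_py (documents : List (List (String × String))) (out : String) : Prop := out = determine_case_type_py_alt documents
instance (documents : List (List (String × String))) (out : String) : Decidable (Spec_determine_case_type_py documents out) := by unfold Spec_determine_case_type_py; infer_instance

-- ===== CLAIM (what is proved, stated in full; the proofs are below) =====
def Claim_equal_determine_case_type_py : Prop := ∀ (documents : List (List (String × String))), Dom_determine_case_type_py documents → Spec_determine_case_type_py documents (determine_case_type_py documents)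

-- ===== LEMMAS AND PROOFS =====

-- membership of x is untouched by addIfMatch with a different docType
theorem mem_addIfMatch_ne (title preview : String) (s : PySem.Set String) (dt x : String)
    (h : dt ≠ x) : ∀ pats, (x ∈ addIfMatch title preview s dt pats ↔ x ∈ s) := by
  intro pats
  induction pats with
  | nil => simp [addIfMatch]
  | cons p rest ih =>
    simp only [addIfMatch]
    split_ifs with hp
    · rw [PySem.Set.mem_add]
      exact ⟨fun h' => h'.elim id (fun e => absurd e.symm h), Or.inl⟩
    · exact ih

-- membership of the added docType after addIfMatch
theorem mem_addIfMatch_self (title preview : String) (s : PySem.Set String) (dt : String) :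
    ∀ pats, (dt ∈ addIfMatch title preview s dt pats ↔
      dt ∈ s ∨ pats.any (fun p => PySem.Str.isIn p title || PySem.Str.isIn p preview) = true) := by
  intro pats
  induction pats with
  | nil => simp [addIfMatch]
  | cons p rest ih =>
    simp only [addIfMatch, List.any_cons]
    split_ifs with hp
    · rw [PySem.Set.mem_add]
      constructor
      · intro _; exact Or.inr (by simp only [hp, Bool.true_or])
      · intro _; exact Or.inr rfl
    · rw [ih]
      rw [Bool.not_eq_true] at hp
      simp only [hp, Bool.false_or]

-- one document's pass of A's inner classification loop, seen at key "complaint"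
theorem mem_innerFold (title preview : String) (s : PySem.Set String) :
    ("complaint" ∈ legalDocPatterns.foldl (fun s' dp => addIfMatch title preview s' dp.1 dp.2) s ↔
      "complaint" ∈ s ∨
        complaintPatterns.any (fun p => PySem.Str.isIn p title || PySem.Str.isIn p preview) = true) := by
  simp only [legalDocPatterns, List.foldl]
  rw [mem_addIfMatch_ne _ _ _ _ _ (by decide),
      mem_addIfMatch_ne _ _ _ _ _ (by decide),
      mem_addIfMatch_ne _ _ _ _ _ (by decide),
      mem_addIfMatch_ne _ _ _ _ _ (by decide),
      mem_addIfMatch_ne _ _ _ _ _ (by decide),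
      mem_addIfMatch_ne _ _ _ _ _ (by decide),
      mem_addIfMatch_ne _ _ _ _ _ (by decide),
      mem_addIfMatch_ne _ _ _ _ _ (by decide),
      mem_addIfMatch_self]
  rfl

-- "complaint" lies in A's identified set iff some document matches B's complaint test
theorem mem_identify_iff (documents : List (List (String × String))) (s : PySem.Set String) :
    ("complaint" ∈ documents.foldl (fun s' doc =>
        let title := PySem.Str.lower (pvGet doc "title" "")
        let preview := PySem.Str.lower (PySem.Str.slice (pvGet doc "body" "") none (some 500))
        legalDocPatterns.foldl (fun s'' dp => addIfMatch title preview s'' dp.1 dp.2) s') s ↔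
      "complaint" ∈ s ∨ documents.any matchesComplaint = true) := by
  induction documents generalizing s with
  | nil => simp
  | cons doc rest ih =>
    simp only [List.foldl, List.any_cons]
    rw [ih, mem_innerFold]
    unfold matchesComplaint
    simp only [Bool.or_eq_true]
    tauto

theorem contains_complaint_eq (documents : List (List (String × String))) :
    PySem.Set.contains (identifyDocumentTypes documents) "complaint" = documents.any matchesComplaint := by
  rcases h : documents.any matchesComplaint with _ | _
  · simp only [Bool.eq_false_iff, ne_eq]
    intro hc
    rw [PySem.Set.contains_iff] at hc
    rw [identifyDocumentTypes] at hc
    rw [mem_identify_iff] at hc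
    rcases hc with hc | hc
    · simp [PySem.Set.empty] at hc
    · rw [h] at hc; cases hc
  · rw [PySem.Set.contains_iff, identifyDocumentTypes, mem_identify_iff]
    exact Or.inr h

-- A's if/elif scan equals B's table-driven first-match scan
theorem scan_eq_findSome (documents : List (List (String × String))) :
    scanCaseType documents = documents.findSome? classifyDoc := by
  induction documents with
  | nil => rfl
  | cons doc rest ih =>
    simp only [scanCaseType, List.findSome?, classifyDoc, caseIndicators, List.findSome?]
    split_ifs with h1 h2 h3 h4 <;> simp_all [List.any_cons]

-- ===== VERDICT (by name: the statement is the Claim_ definition above) =====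
theorem determine_case_type_py_spec : Claim_equal_determine_case_type_py := by
  intro documents _
  unfold Spec_determine_case_type_py
  simp only [determine_case_type_py, determine_case_type_py_alt, contains_complaint_eq, scan_eq_findSome]
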